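-- pv_equiv track=rewrite | github.com/maishathasin/bloggit | test.py | format_directory_structure
-- ===== SOURCE A (Python) =====
-- def format_directory_structure(structure):
--     def is_directory(item):
--         return item in structure
--
--     def format_tree(node, prefix="", is_last=True):
--         tree = ""
--         if node:  # For non-root nodes
--             tree += f"{prefix}{'└── ' if is_last else '├── '}{node.split('/')[-1]}\n"
--
--         if node in structure:
--             children = structure[node]
--             for i, child in enumerate(children):
--                 extension = "    " if is_last else "│   "
--                 tree += format_tree(child.split('/')[-1], prefix + extension, i == len(children) - 1)
--         return tree
--
--     # Start from the roots (top-level directories)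
--     roots = [node for node in structure if not any(node in items for items in structure.values())]
--     return '\n'.join(format_tree(root) for root in roots).strip()
-- ===== SOURCE B (Python) =====
-- def format_directory_structure(structure):
--     def basename(p):
--         return p.split('/')[-1]
--
--     def render(root):
--         out = ""
--         stack = [(root, "", True)]
--         while stack:
--             (node, prefix, is_last), stack = stack[0], stack[1:]
--             if node:
--                 out += f"{prefix}{'└── ' if is_last else '├── '}{basename(node)}\n"
--             if node in structure:
--                 children = structure[node]
--                 extension = "    " if is_last else "│   "
--                 n = len(children)
--                 stack = [(basename(c), prefix + extension, i == n - 1)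
--                          for i, c in enumerate(children)] + stack
--         return out
--
--     roots = [node for node in structure if not any(node in items for items in structure.values())]
--     return '\n'.join(render(root) for root in roots).strip()
-- ===== Notes on version B (the rewrite author's own statement) =====
-- stated objective: alternative
-- what changed: A's recursive format_tree is replaced by an iterative depth-first traversal over an explicit stack of (node, prefix, is_last) frames that accumulates the output string in a single while loop.
import Mathlib
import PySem

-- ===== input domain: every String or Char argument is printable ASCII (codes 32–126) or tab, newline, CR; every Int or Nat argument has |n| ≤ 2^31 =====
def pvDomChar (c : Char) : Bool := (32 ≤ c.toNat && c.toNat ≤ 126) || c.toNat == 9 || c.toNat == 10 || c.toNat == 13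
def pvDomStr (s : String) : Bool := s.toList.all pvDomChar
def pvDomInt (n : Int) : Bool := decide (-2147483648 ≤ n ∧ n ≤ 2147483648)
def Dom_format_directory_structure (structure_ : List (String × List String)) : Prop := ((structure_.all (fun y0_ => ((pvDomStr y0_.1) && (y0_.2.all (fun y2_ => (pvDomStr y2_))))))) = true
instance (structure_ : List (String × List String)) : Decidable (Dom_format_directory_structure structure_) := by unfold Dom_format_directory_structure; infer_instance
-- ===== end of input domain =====

-- B replaces A's recursive tree formatter by an iterative depth-first loop over an explicit
-- stack of (node, prefix, is_last) frames (objective: alternative decomposition, same cost).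
-- Fuel arguments in both ports are totality guards only; they never run out on Pre_ inputs.

-- ===== PORT A =====
-- s.split('/')[-1]
def pvBase (s : String) : String :=
  (PySem.List.pyGet? ((PySem.Str.split? s "/").getD []) (-1)).getD ""

-- the f-string  f"{prefix}{'└── ' if is_last else '├── '}{node.split('/')[-1]}\n"
def pvLine (prefix_ node : String) (isLast : Bool) : String :=
  prefix_ ++ (if isLast then "└── " else "├── ") ++ pvBase node ++ "\n"

-- A's recursive format_tree (fuel-guarded for totality; fuel never runs out under Pre_)
def pvRenderA (d : PySem.Dict String (List String)) (f : Nat) (node prefix_ : String)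
    (isLast : Bool) : String :=
  let tree := if node ≠ "" then pvLine prefix_ node isLast else ""
  match f, d.get? node with
  | f' + 1, some children =>
    (PySem.List.enumerate children 0).foldl
      (fun acc ic =>
        acc ++ pvRenderA d f' (pvBase ic.2)
          (prefix_ ++ (if isLast then "    " else "│   "))
          (ic.1 == (children.length : Int) - 1))
      tree
  | _, _ => tree
termination_by f

def format_directory_structure (structure_ : List (String × List String)) : String :=
  let d := PySem.Dict.mk structure_
  let roots := d.keys.filter (fun node => !(d.values.any (fun items => items.contains node)))
  PySem.Str.strip (PySem.Str.join "\n"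
    (roots.map (fun root => pvRenderA d (structure_.length + 1) root "" true)))

-- ===== PORT B =====
-- fuel bound for the loop (port-side totality guard only; not in the Python)
def pvSumKids (structure_ : List (String × List String)) : Nat :=
  (structure_.map (fun p => p.2.length)).sum

-- B's while-loop over an explicit stack; each frame carries its remaining depth fuel
def pvRenderB (d : PySem.Dict String (List String)) (g : Nat)
    (stack : List (Nat × String × String × Bool)) (out : String) : String :=
  match g, stack with
  | _, [] => out
  | 0, _ :: _ => out
  | g' + 1, (f, node, prefix_, isLast) :: rest =>
    let out2 := if node ≠ "" then out ++ pvLine prefix_ node isLast else out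
    match f, d.get? node with
    | f' + 1, some children =>
      let extension := if isLast then "    " else "│   "
      pvRenderB d g'
        (((PySem.List.enumerate children 0).map
            (fun ic => (f', pvBase ic.2, prefix_ ++ extension,
                        ic.1 == (children.length : Int) - 1))) ++ rest) out2
    | _, _ => pvRenderB d g' rest out2
termination_by g

def format_directory_structure_alt (structure_ : List (String × List String)) : String :=
  let d := PySem.Dict.mk structure_
  let roots := d.keys.filter (fun node => !(d.values.any (fun items => items.contains node)))
  PySem.Str.strip (PySem.Str.join "\n"
    (roots.map (fun root =>
      pvRenderB d ((pvSumKids structure_ + 1) ^ (structure_.length + 1))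
        [(structure_.length + 1, root, "", true)] "")))

-- ===== PRECONDITION & SPEC =====
-- graph of A's recursion: node → basenames of its children (keys only)
def pvSuccs (d : PySem.Dict String (List String)) (x : String) : List String :=
  match d.get? x with
  | some ch => ch.map pvBase
  | none => []

def pvStep (d : PySem.Dict String (List String)) (s : List String) : List String :=
  PySem.List.dedup (s ++ s.flatMap (pvSuccs d))

-- Pre_ excludes (a) association lists with duplicate keys, which do not encode a Python dict
-- unambiguously, and (b) structures with a cycle reachable from a root, on which Python A
-- raises RecursionError (and Python B does not terminate).
def Pre_format_directory_structure (structure_ : List (String × List String)) : Prop :=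
  (structure_.map Prod.fst).Nodup ∧
  (∀ k ∈ (pvStep (PySem.Dict.mk structure_))^[structure_.length + 1]
        ((PySem.Dict.mk structure_).keys.filter
          (fun node => !((PySem.Dict.mk structure_).values.any (fun items => items.contains node)))),
     k ∉ (pvStep (PySem.Dict.mk structure_))^[structure_.length + 1]
        (pvSuccs (PySem.Dict.mk structure_) k))
instance (structure_ : List (String × List String)) : Decidable (Pre_format_directory_structure structure_) := by unfold Pre_format_directory_structure; infer_instance

def pvWitness_format_directory_structure : (List (String × List String)) := [("a", ["b"]), ("b", [])]

def Spec_format_directory_structure (structure_ : List (String × List String)) (out : String) : Prop := out = format_directory_structure_alt structure_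
instance (structure_ : List (String × List String)) (out : String) : Decidable (Spec_format_directory_structure structure_ out) := by unfold Spec_format_directory_structure; infer_instance

-- ===== CLAIM (what is proved, stated in full; the proofs are below) =====
def Claim_equal_format_directory_structure : Prop := ∀ (structure_ : List (String × List String)), Dom_format_directory_structure structure_ → Pre_format_directory_structure structure_ → Spec_format_directory_structure structure_ (format_directory_structure structure_)

-- ===== LEMMAS AND PROOFS =====

def pvSconcat (l : List String) : String := l.foldr (· ++ ·) ""

theorem pvSconcat_cons (x : String) (l : List String) :
    pvSconcat (x :: l) = x ++ pvSconcat l := rfl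

theorem pvSconcat_append (l1 l2 : List String) :
    pvSconcat (l1 ++ l2) = pvSconcat l1 ++ pvSconcat l2 := by
  induction l1 with
  | nil => simp [pvSconcat, String.empty_append]
  | cons x xs ih => simp [pvSconcat, List.foldr] at ih ⊢; rw [ih, String.append_assoc]

theorem pvStrFoldl {α : Type} (l : List α) (g : α → String) (a : String) :
    l.foldl (fun acc x => acc ++ g x) a = a ++ pvSconcat (l.map g) := by
  induction l generalizing a with
  | nil => simp [pvSconcat, String.append_empty]
  | cons x xs ih => simp only [List.foldl, List.map, pvSconcat, List.foldr] at ih ⊢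
                    rw [ih, String.append_assoc]

theorem pvKidsBound (structure_ : List (String × List String)) :
    ∀ node ch, (PySem.Dict.mk structure_).get? node = some ch →
      ch.length ≤ pvSumKids structure_ := by
  intro node ch h
  have hmem : (node, ch) ∈ (PySem.Dict.mk structure_).items :=
    PySem.Dict.mem_items_of_get?_eq_some _ h
  have hmem' : (node, ch) ∈ structure_ := hmem
  have : ch.length ∈ structure_.map (fun p => p.2.length) :=
    List.mem_map.mpr ⟨(node, ch), hmem', rfl⟩
  exact List.le_sum_of_mem this

def pvMsr (B : Nat) (st : List (Nat × String × String × Bool)) : Nat :=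
  (st.map (fun fr => (B + 1) ^ fr.1)).sum

def pvRenderFrame (d : PySem.Dict String (List String))
    (fr : Nat × String × String × Bool) : String :=
  pvRenderA d fr.1 fr.2.1 fr.2.2.1 fr.2.2.2

theorem pvLoopEq (d : PySem.Dict String (List String)) (B : Nat)
    (hB : ∀ node ch, d.get? node = some ch → ch.length ≤ B) :
    ∀ (g : Nat) (st : List (Nat × String × String × Bool)) (out : String),
      pvMsr B st ≤ g →
      pvRenderB d g st out = out ++ pvSconcat (st.map (pvRenderFrame d)) := by
  intro g
  induction g with
  | zero =>
    intro st out h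
    cases st with
    | nil => simp [pvRenderB, pvSconcat, String.append_empty]
    | cons fr rest =>
      exfalso
      have h1 : 1 ≤ (B + 1) ^ fr.1 := Nat.one_le_pow _ _ (Nat.succ_pos B)
      simp only [pvMsr, List.map_cons, List.sum_cons] at h
      omega
  | succ g' ih =>
    intro st out h
    cases st with
    | nil => simp [pvRenderB, pvSconcat, String.append_empty]
    | cons fr rest =>
      obtain ⟨f, node, pfx, last⟩ := fr
      have hP : 1 ≤ (B + 1) ^ f := Nat.one_le_pow _ _ (Nat.succ_pos B)
      have hrest : pvMsr B rest ≤ g' := by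
        simp only [pvMsr, List.map_cons, List.sum_cons] at h ⊢; omega
      have hleaf : ∀ X : String,
          (if node ≠ "" then out ++ pvLine pfx node last else out) ++ X =
          out ++ ((if node ≠ "" then pvLine pfx node last else "") ++ X) := by
        intro X
        split_ifs with hn
        · rw [String.append_assoc]
        · rw [String.empty_append]
      cases f with
      | zero =>
        have hstep : pvRenderB d (g' + 1) ((0, node, pfx, last) :: rest) out =
            pvRenderB d g' rest (if node ≠ "" then out ++ pvLine pfx node last else out) := by
          rw [pvRenderB.eq_def]
        have hrf : pvRenderFrame d (0, node, pfx, last) =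
            (if node ≠ "" then pvLine pfx node last else "") := by
          rw [pvRenderFrame, pvRenderA.eq_def]
        rw [hstep, ih rest _ hrest, List.map_cons, pvSconcat_cons, hrf, hleaf]
      | succ f' =>
        cases hg : d.get? node with
        | none =>
          have hstep : pvRenderB d (g' + 1) ((f' + 1, node, pfx, last) :: rest) out =
              pvRenderB d g' rest (if node ≠ "" then out ++ pvLine pfx node last else out) := by
            rw [pvRenderB.eq_def]; simp only [hg]
          have hrf : pvRenderFrame d (f' + 1, node, pfx, last) =
              (if node ≠ "" then pvLine pfx node last else "") := by
            rw [pvRenderFrame, pvRenderA.eq_def]; simp only [hg]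
          rw [hstep, ih rest _ hrest, List.map_cons, pvSconcat_cons, hrf, hleaf]
        | some ch =>
          have hstep : pvRenderB d (g' + 1) ((f' + 1, node, pfx, last) :: rest) out =
              pvRenderB d g'
                (((PySem.List.enumerate ch 0).map
                    (fun ic => (f', pvBase ic.2, pfx ++ (if last then "    " else "│   "),
                                ic.1 == (ch.length : Int) - 1))) ++ rest)
                (if node ≠ "" then out ++ pvLine pfx node last else out) := by
            rw [pvRenderB.eq_def]; simp only [hg]
          have hmeasure :
              pvMsr B ((PySem.List.enumerate ch 0).map
                (fun ic => (f', pvBase ic.2, pfx ++ (if last then "    " else "│   "),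
                            ic.1 == (ch.length : Int) - 1)) ++ rest) ≤ g' := by
            have hlen : ch.length ≤ B := hB node ch hg
            have hsum : (((PySem.List.enumerate ch 0).map
                (fun ic => ((f', pvBase ic.2, pfx ++ (if last then "    " else "│   "),
                            ic.1 == (ch.length : Int) - 1) : Nat × String × String × Bool))).map
                (fun fr => (B + 1) ^ fr.1)).sum = ch.length * (B + 1) ^ f' := by
              rw [List.map_map]
              have : ((fun fr : Nat × String × String × Bool => (B + 1) ^ fr.1) ∘
                  (fun ic : Int × String => ((f', pvBase ic.2, pfx ++ (if last then "    " else "│   "),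
                            ic.1 == (ch.length : Int) - 1) : Nat × String × String × Bool))) =
                  (fun _ : Int × String => (B + 1) ^ f') := rfl
              rw [this, List.map_const']
              simp [List.sum_replicate, PySem.List.length_enumerate, smul_eq_mul]
            have hc : ch.length * (B + 1) ^ f' ≤ B * (B + 1) ^ f' :=
              Nat.mul_le_mul_right _ hlen
            have hP' : 1 ≤ (B + 1) ^ f' := Nat.one_le_pow _ _ (Nat.succ_pos B)
            have hpow : (B + 1) ^ (f' + 1) = B * (B + 1) ^ f' + (B + 1) ^ f' := by
              rw [pow_succ]; ring
            simp only [pvMsr, List.map_append, List.sum_append, List.map_cons,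
              List.sum_cons] at h ⊢
            rw [hsum]
            omega
          have hrf : pvRenderFrame d (f' + 1, node, pfx, last) =
              (if node ≠ "" then pvLine pfx node last else "") ++
                pvSconcat (((PySem.List.enumerate ch 0).map
                  (fun ic => ((f', pvBase ic.2, pfx ++ (if last then "    " else "│   "),
                              ic.1 == (ch.length : Int) - 1) : Nat × String × String × Bool))).map
                  (pvRenderFrame d)) := by
            rw [pvRenderFrame, pvRenderA.eq_def]
            simp only [hg]
            rw [pvStrFoldl]
            rw [List.map_map]
            rfl
          rw [hstep, ih _ _ hmeasure, List.map_append, pvSconcat_append, hleaf,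
            List.map_cons, pvSconcat_cons, hrf]
          simp only [String.append_assoc]

-- ===== VERDICT (by name: the statement is the Claim_ definition above) =====
theorem format_directory_structure_spec : Claim_equal_format_directory_structure := by
  intro structure_ _ _
  unfold Spec_format_directory_structure
  unfold format_directory_structure format_directory_structure_alt
  simp only []
  congr 2
  apply List.map_congr_left
  intro root _
  have hB := pvKidsBound structure_
  have hm : pvMsr (pvSumKids structure_)
      [(structure_.length + 1, root, "", true)] ≤
      (pvSumKids structure_ + 1) ^ (structure_.length + 1) := by
    simp [pvMsr]
  rw [pvLoopEq (PySem.Dict.mk structure_) (pvSumKids structure_) hB _ _ _ hm]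
  simp [pvSconcat, pvRenderFrame, String.empty_append, String.append_empty]
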